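-- pv_equiv track=rewrite | github.com/HOZHENWAI/Beets-Plugin_VGMdb | beetsplug/VGMplug.py | format_list_of_person
-- ===== SOURCE A (Python) =====
-- from typing import Dict, List, Sequence, Optional, Iterable
--
-- def format_list_of_person(listofVGMPerson: List, typeofPerson: str):
--     out = {}
--     if len(listofVGMPerson) > 0:
--         if "names" in listofVGMPerson[0].keys():
--             for lang in listofVGMPerson[0]["names"].keys():
--                 out[f"{typeofPerson}_{lang}"] = ",".join(
--                     [
--                         person["names"][lang]
--                         for person in listofVGMPerson
--                         if lang in person["names"].keys()
--                     ]
--                 )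
--     return out
-- ===== SOURCE B (Python) =====
-- def format_list_of_person(listofVGMPerson, typeofPerson):
--     # Return-value equivalent to A; single pass over persons feeding per-language
--     # buckets instead of one nested scan per language.
--     if not listofVGMPerson or "names" not in listofVGMPerson[0]:
--         return {}
--     buckets = {lang: [] for lang in listofVGMPerson[0]["names"]}
--     for person in listofVGMPerson:
--         for lang, name in person.get("names", {}).items():
--             if lang in buckets:
--                 buckets[lang].append(name)
--     return {f"{typeofPerson}_{lang}": ",".join(names) for lang, names in buckets.items()}
-- ===== Notes on version B (the rewrite author's own statement) =====
-- stated objective: alternative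
-- what changed: B inverts the loop nest: instead of one scan over all persons per language of the first person, it pre-seeds one bucket per language of the first person, fills the buckets in a single pass over persons and their own names, and joins at the end.
import Mathlib
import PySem

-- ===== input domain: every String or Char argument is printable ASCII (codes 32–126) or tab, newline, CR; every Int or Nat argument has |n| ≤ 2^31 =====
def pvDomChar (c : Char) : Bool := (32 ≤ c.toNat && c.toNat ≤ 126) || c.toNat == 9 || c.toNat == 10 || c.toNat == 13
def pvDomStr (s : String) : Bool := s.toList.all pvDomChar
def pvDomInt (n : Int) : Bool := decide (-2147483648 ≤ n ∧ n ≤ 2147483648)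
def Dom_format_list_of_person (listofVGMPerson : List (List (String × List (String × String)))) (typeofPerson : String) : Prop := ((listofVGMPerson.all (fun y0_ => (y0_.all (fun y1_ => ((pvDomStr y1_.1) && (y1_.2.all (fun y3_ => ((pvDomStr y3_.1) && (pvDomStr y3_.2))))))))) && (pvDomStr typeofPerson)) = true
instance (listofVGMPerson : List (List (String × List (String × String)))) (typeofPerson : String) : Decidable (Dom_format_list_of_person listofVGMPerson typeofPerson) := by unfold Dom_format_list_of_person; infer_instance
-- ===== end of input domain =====

-- B inverts A's loop nest: one pass over persons filling pre-seeded per-language buckets,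
-- instead of one scan over all persons per language of the first person (objective: alternative).

-- person["names"] as a dict (getD "" only reached under Pre_/the .get of B)
def pvNames (person : List (String × List (String × String))) : PySem.Dict String String :=
  PySem.Dict.ofList ((PySem.Dict.ofList person).getD "names" [])

-- ===== PORT A =====
def format_list_of_person (listofVGMPerson : List (List (String × List (String × String)))) (typeofPerson : String) : List (String × String) :=
  let out : PySem.Dict String String := PySem.Dict.empty
  let out :=
    if listofVGMPerson.length > 0 then
      if (PySem.Dict.ofList (listofVGMPerson.headD [])).contains "names" then
        (pvNames (listofVGMPerson.headD [])).keys.foldl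
          (fun out lang =>
            out.insert (typeofPerson ++ "_" ++ lang)
              (PySem.Str.join ","
                ((listofVGMPerson.filter (fun person => (pvNames person).contains lang)).map
                  (fun person => (pvNames person).getD lang ""))))
          out
      else out
    else out
  out.items

-- ===== PORT B =====
def format_list_of_person_alt (listofVGMPerson : List (List (String × List (String × String)))) (typeofPerson : String) : List (String × String) :=
  match listofVGMPerson with
  | [] => []
  | p0 :: _ =>
    if (PySem.Dict.ofList p0).contains "names" then
      let buckets : PySem.Dict String (List String) :=
        (pvNames p0).keys.foldl (fun b lang => b.insert lang []) PySem.Dict.empty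
      let buckets := listofVGMPerson.foldl
        (fun b person =>
          (pvNames person).items.foldl
            (fun b p => if b.contains p.1 then b.modify p.1 [] (· ++ [p.2]) else b) b)
        buckets
      buckets.items.map (fun p => (typeofPerson ++ "_" ++ p.1, PySem.Str.join "," p.2))
    else []

-- ===== PRECONDITION & SPEC =====
-- Pre_ excludes exactly the inputs on which A raises KeyError: a non-empty list whose first
-- person has a non-empty names dict while some person lacks the "names" key.
def Pre_format_list_of_person (listofVGMPerson : List (List (String × List (String × String)))) (typeofPerson : String) : Prop :=
  (listofVGMPerson ≠ [] ∧ (PySem.Dict.ofList (listofVGMPerson.headD [])).contains "names" = true ∧ (pvNames (listofVGMPerson.headD [])).keys ≠ []) →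
    ∀ person ∈ listofVGMPerson, (PySem.Dict.ofList person).contains "names" = true
instance (listofVGMPerson : List (List (String × List (String × String)))) (typeofPerson : String) : Decidable (Pre_format_list_of_person listofVGMPerson typeofPerson) := by unfold Pre_format_list_of_person; infer_instance

def pvWitness_format_list_of_person : (List (List (String × List (String × String)))) × String :=
  ([[("names", [("en", "Alice"), ("ja", "Arisu")])], [("names", [("en", "Bob")])]], "composer")

def Spec_format_list_of_person (listofVGMPerson : List (List (String × List (String × String)))) (typeofPerson : String) (out : List (String × String)) : Prop := out = format_list_of_person_alt listofVGMPerson typeofPerson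
instance (listofVGMPerson : List (List (String × List (String × String)))) (typeofPerson : String) (out : List (String × String)) : Decidable (Spec_format_list_of_person listofVGMPerson typeofPerson out) := by unfold Spec_format_list_of_person; infer_instance

-- ===== CLAIM (what is proved, stated in full; the proofs are below) =====
def Claim_equal_format_list_of_person : Prop := ∀ (listofVGMPerson : List (List (String × List (String × String)))) (typeofPerson : String), Dom_format_list_of_person listofVGMPerson typeofPerson → Pre_format_list_of_person listofVGMPerson typeofPerson → Spec_format_list_of_person listofVGMPerson typeofPerson (format_list_of_person listofVGMPerson typeofPerson)
-- ===== LEMMAS AND PROOFS =====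

-- the inner loop of B: one step per (lang, name) pair of one person
def pvStep (b : PySem.Dict String (List String)) (p : String × String) : PySem.Dict String (List String) :=
  if b.contains p.1 then b.modify p.1 [] (· ++ [p.2]) else b

theorem keys_pvStep (b : PySem.Dict String (List String)) (p : String × String) :
    (pvStep b p).keys = b.keys := by
  unfold pvStep
  split_ifs with h
  · rw [PySem.Dict.keys_modify, PySem.Dict.keys_insert_of_contains _ _ h]
  · rfl

theorem keys_foldl_pvStep (ps : List (String × String)) (b : PySem.Dict String (List String)) :
    (ps.foldl pvStep b).keys = b.keys := by
  induction ps generalizing b with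
  | nil => rfl
  | cons p ps ih => rw [List.foldl_cons, ih, keys_pvStep]

theorem contains_pvStep (b : PySem.Dict String (List String)) (p : String × String) (k : String) :
    (pvStep b p).contains k = b.contains k := by
  rw [PySem.Dict.contains_eq_decide_mem_keys, PySem.Dict.contains_eq_decide_mem_keys, keys_pvStep]

theorem getD_pvStep (b : PySem.Dict String (List String)) (p : String × String)
    (lang : String) (h : b.contains lang = true) :
    (pvStep b p).getD lang [] = b.getD lang [] ++ (if p.1 == lang then [p.2] else []) := by
  by_cases hk : (p.1 == lang) = true
  · have hkl : p.1 = lang := eq_of_beq hk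
    have hc : b.contains p.1 = true := by rw [hkl]; exact h
    rw [pvStep, if_pos hc, PySem.Dict.getD_modify]
    simp [hkl]
  · have hkl : p.1 ≠ lang := fun e => hk (by simp [e])
    rw [pvStep]
    split_ifs with hc
    · rw [PySem.Dict.getD_modify, if_neg (fun e => hkl e.symm)]
      simp
    · simp

theorem getD_foldl_pvStep (ps : List (String × String)) (b : PySem.Dict String (List String))
    (lang : String) (h : b.contains lang = true) :
    (ps.foldl pvStep b).getD lang [] = b.getD lang [] ++ (ps.filter (fun p => p.1 == lang)).map (·.2) := by
  induction ps generalizing b with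
  | nil => simp
  | cons p ps ih =>
    rw [List.foldl_cons, ih _ (by rw [contains_pvStep]; exact h), getD_pvStep b p lang h,
      List.filter_cons]
    by_cases hp : (p.1 == lang) = true <;> simp [hp, List.append_assoc]

-- the outer loop of B: one inner loop per person
def pvOuter (b : PySem.Dict String (List String)) (person : List (String × List (String × String))) :
    PySem.Dict String (List String) :=
  (pvNames person).items.foldl pvStep b

theorem keys_foldl_pvOuter (l : List (List (String × List (String × String))))
    (b : PySem.Dict String (List String)) : (l.foldl pvOuter b).keys = b.keys := by
  induction l generalizing b with
  | nil => rfl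
  | cons x l ih => rw [List.foldl_cons, ih, pvOuter, keys_foldl_pvStep]

theorem getD_foldl_pvOuter (l : List (List (String × List (String × String))))
    (b : PySem.Dict String (List String)) (lang : String) (h : b.contains lang = true) :
    (l.foldl pvOuter b).getD lang [] =
      b.getD lang [] ++ l.flatMap (fun person => ((pvNames person).items.filter (fun p => p.1 == lang)).map (·.2)) := by
  induction l generalizing b with
  | nil => simp
  | cons x l ih =>
    have hc : (pvOuter b x).contains lang = true := by
      rw [PySem.Dict.contains_eq_decide_mem_keys, pvOuter, keys_foldl_pvStep,
        ← PySem.Dict.contains_eq_decide_mem_keys]; exact h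
    rw [List.foldl_cons, ih _ hc, pvOuter, getD_foldl_pvStep _ _ _ h, List.flatMap_cons,
      List.append_assoc]

-- items of a dict filtered to one key
theorem pairs_filter_nodup (xs : List (String × String)) (k : String) (v : String)
    (hnd : (xs.map Prod.fst).Nodup) (hmem : (k, v) ∈ xs) :
    xs.filter (fun p => p.1 == k) = [(k, v)] := by
  induction xs with
  | nil => cases hmem
  | cons x xs ih =>
    simp only [List.map_cons, List.nodup_cons] at hnd
    rcases List.mem_cons.1 hmem with h | h
    · subst h
      rw [List.filter_cons, if_pos (by simp)]
      have hnil : xs.filter (fun p => p.1 == k) = [] := by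
        apply List.filter_eq_nil_iff.2
        intro p hp hb
        have : p.1 ∈ xs.map Prod.fst := List.mem_map_of_mem hp
        rw [eq_of_beq hb] at this
        exact hnd.1 this
      rw [hnil]
    · have hb : (x.1 == k) = false := by
        cases hb : (x.1 == k) with
        | false => rfl
        | true =>
          have hx : x.1 ∈ xs.map Prod.fst := by
            rw [eq_of_beq hb]
            exact List.mem_map_of_mem h
          exact absurd hx hnd.1
      rw [List.filter_cons, hb, if_neg (by simp)]
      exact ih hnd.2 h

theorem filter_items_eq (d : PySem.Dict String String) (lang : String) (hnd : d.keys.Nodup) :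
    (d.items.filter (fun p => p.1 == lang)).map (·.2) =
      if d.contains lang = true then [d.getD lang ""] else [] := by
  by_cases hc : d.contains lang = true
  · obtain ⟨p, hp, he⟩ := List.mem_map.1 ((PySem.Dict.contains_iff_mem_keys d lang).1 hc)
    obtain ⟨k, v⟩ := p
    cases he
    rw [pairs_filter_nodup d.items _ v hnd hp, if_pos hc, List.map_cons, List.map_nil,
      PySem.Dict.getD_of_mem_items d hp hnd]
  · rw [if_neg hc]
    have : d.items.filter (fun p => p.1 == lang) = [] := by
      apply List.filter_eq_nil_iff.2
      intro p hp hb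
      exact hc ((PySem.Dict.contains_iff_mem_keys d lang).2
        (by rw [← eq_of_beq hb]; exact List.mem_map_of_mem hp))
    rw [this]; rfl

theorem flatMap_if_eq_filter_map (l : List (List (String × List (String × String))))
    (c : List (String × List (String × String)) → Bool)
    (f : List (String × List (String × String)) → String) :
    l.flatMap (fun person => if c person = true then [f person] else []) =
      (l.filter c).map f := by
  induction l with
  | nil => rfl
  | cons x l ih =>
    rw [List.flatMap_cons, List.filter_cons, ih]
    by_cases hx : c x = true <;> simp [hx]

theorem pvKeyInj (t a b : String) (h : t ++ "_" ++ a = t ++ "_" ++ b) : a = b := by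
  apply String.ext
  have h' := congrArg String.toList h
  simpa [String.toList_append] using h'

theorem nodup_map_inj (f : String → String) (hf : ∀ a b, f a = f b → a = b)
    (l : List String) (h : l.Nodup) : (l.map f).Nodup := by
  induction l with
  | nil => simp
  | cons x xs ih =>
    rw [List.map_cons, List.nodup_cons]
    rw [List.nodup_cons] at h
    refine ⟨fun hm => ?_, ih h.2⟩
    obtain ⟨a, ha, he⟩ := List.mem_map.1 hm
    exact h.1 (hf a x he ▸ ha)

-- the seeded buckets of B: one empty list per language of the first person
def pvSeed (langs : List String) : PySem.Dict String (List String) :=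
  langs.foldl (fun b lang => b.insert lang ([] : List String)) PySem.Dict.empty

theorem items_pvSeed (langs : List String) (hnd : langs.Nodup) :
    (pvSeed langs).items = langs.map (fun lang => (lang, ([] : List String))) := by
  have h := PySem.Dict.items_foldl_insert_fresh langs (fun a : String => a) (fun _ => ([] : List String)) PySem.Dict.empty
    (fun a _ => PySem.Dict.contains_empty _) (by simpa using hnd)
  exact h.trans (List.nil_append _)

theorem keys_pvSeed (langs : List String) (hnd : langs.Nodup) : (pvSeed langs).keys = langs := by
  show (pvSeed langs).items.map Prod.fst = langs
  rw [items_pvSeed langs hnd, List.map_map]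
  exact List.map_id langs

-- the per-language joined list agrees between the two ports
theorem bucket_content (l : List (List (String × List (String × String))))
    (b : PySem.Dict String (List String)) (lang : String)
    (hc : b.contains lang = true) (hz : b.getD lang [] = []) :
    (l.foldl pvOuter b).getD lang [] =
      (l.filter (fun person => (pvNames person).contains lang)).map
        (fun person => (pvNames person).getD lang "") := by
  rw [getD_foldl_pvOuter l b lang hc, hz, List.nil_append,
    ← flatMap_if_eq_filter_map]
  congr 1
  funext person
  exact filter_items_eq (pvNames person) lang (PySem.Dict.nodup_keys_ofList _)

-- the two ports, after the shared guards, as one equality parametrised by the language list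
theorem main_eq (l : List (List (String × List (String × String)))) (t : String)
    (langs : List String) (hnd : langs.Nodup) :
    (langs.foldl (fun out lang =>
        out.insert (t ++ "_" ++ lang)
          (PySem.Str.join ","
            ((l.filter (fun person => (pvNames person).contains lang)).map
              (fun person => (pvNames person).getD lang "")))) PySem.Dict.empty).items =
      ((l.foldl pvOuter (pvSeed langs)).items).map
        (fun p => (t ++ "_" ++ p.1, PySem.Str.join "," p.2)) := by
  have hA : (langs.foldl (fun out lang =>
        out.insert (t ++ "_" ++ lang)
          (PySem.Str.join ","
            ((l.filter (fun person => (pvNames person).contains lang)).map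
              (fun person => (pvNames person).getD lang "")))) PySem.Dict.empty).items =
      langs.map (fun lang => (t ++ "_" ++ lang,
        PySem.Str.join ","
          ((l.filter (fun person => (pvNames person).contains lang)).map
            (fun person => (pvNames person).getD lang "")))) := by
    have h := PySem.Dict.items_foldl_insert_fresh langs (fun lang => t ++ "_" ++ lang)
      (fun lang => PySem.Str.join ","
        ((l.filter (fun person => (pvNames person).contains lang)).map
          (fun person => (pvNames person).getD lang ""))) PySem.Dict.empty
      (fun a _ => PySem.Dict.contains_empty _) (nodup_map_inj _ (pvKeyInj t) langs hnd)
    exact h.trans (List.nil_append _)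
  have hkeys : (l.foldl pvOuter (pvSeed langs)).keys = langs := by
    rw [keys_foldl_pvOuter, keys_pvSeed langs hnd]
  have hB : (l.foldl pvOuter (pvSeed langs)).items =
      langs.map (fun lang => (lang, (l.foldl pvOuter (pvSeed langs)).getD lang [])) := by
    rw [PySem.Dict.items_eq_map_keys _ (by rw [hkeys]; exact hnd) ([] : List String), hkeys]
  rw [hA, hB, List.map_map]
  apply List.map_congr_left
  intro lang hmem
  have hcin : (pvSeed langs).contains lang = true := by
    rw [PySem.Dict.contains_iff_mem_keys, keys_pvSeed langs hnd]; exact hmem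
  have hzin : (pvSeed langs).getD lang [] = [] :=
    PySem.Dict.getD_of_mem_items (pvSeed langs)
      (by rw [items_pvSeed langs hnd]; exact List.mem_map_of_mem hmem)
      (by rw [keys_pvSeed langs hnd]; exact hnd) []
  simp only [Function.comp]
  rw [bucket_content l (pvSeed langs) lang hcin hzin]

theorem format_list_of_person_spec : Claim_equal_format_list_of_person := by
  intro l t _ _
  unfold Spec_format_list_of_person
  match l with
  | [] => rfl
  | p0 :: rest =>
    by_cases h0 : (PySem.Dict.ofList p0).contains "names" = true
    · have h := main_eq (p0 :: rest) t (pvNames p0).keys (PySem.Dict.nodup_keys_ofList _)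
      simpa [format_list_of_person, format_list_of_person_alt, h0] using h
    · simp [format_list_of_person, format_list_of_person_alt, h0, PySem.Dict.empty]
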